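-- pv_equiv track=rewrite | github.com/dcl5255/Codility-Lessons | Lessons/4-Counting Elements/PermCheck.py | solution
-- ===== SOURCE A (Python) =====
-- def solution(A):
--     encountered = set()
--     N = len(A)
--
--     for i in A:
--         if i in encountered or i > N:
--             return 0
--         encountered.add(i)
--
--     for i in range(1, len(A) + 1):
--         if i not in encountered:
--             return 0
--
--     return 1
-- ===== SOURCE B (Python) =====
-- def solution(A):
--     return 1 if sorted(A) == list(range(1, len(A) + 1)) else 0
-- ===== Notes on version B (the rewrite author's own statement) =====
-- stated objective: simpler
-- what changed: Replaced the two membership passes over a growing set with a single sorted(A) == list(range(1, N+1)) comparison.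
import Mathlib
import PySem

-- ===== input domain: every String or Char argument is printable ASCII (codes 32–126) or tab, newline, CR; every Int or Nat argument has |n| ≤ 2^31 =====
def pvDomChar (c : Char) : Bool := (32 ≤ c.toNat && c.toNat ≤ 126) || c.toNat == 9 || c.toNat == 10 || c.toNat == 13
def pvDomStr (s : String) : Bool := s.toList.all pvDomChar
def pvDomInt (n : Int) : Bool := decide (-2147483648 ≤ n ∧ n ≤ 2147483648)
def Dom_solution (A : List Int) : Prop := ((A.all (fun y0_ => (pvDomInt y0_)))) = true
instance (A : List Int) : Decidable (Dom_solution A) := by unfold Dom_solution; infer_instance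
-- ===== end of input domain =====

-- B replaces A's set-based membership passes by one sorted(A) == list(range(1, N+1)) comparison; objective: simpler.

-- ===== PORT A =====
-- first loop: 'for i in A: if i in encountered or i > N: return 0; encountered.add(i)'
def solutionLoop1 (N : Int) : List Int → PySem.Set Int → Option (PySem.Set Int)
  | [], enc => some enc
  | i :: rest, enc =>
      if PySem.Set.contains enc i || decide (i > N) then none
      else solutionLoop1 N rest (PySem.Set.add enc i)

-- second loop: 'for i in range(1, len(A)+1): if i not in encountered: return 0' then 'return 1'
def solutionLoop2 (enc : PySem.Set Int) : List Int → Int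
  | [] => 1
  | i :: rest => if ¬ PySem.Set.contains enc i then 0 else solutionLoop2 enc rest

def solution (A : List Int) : Int :=
  match solutionLoop1 (A.length : Int) A PySem.Set.empty with
  | none => 0
  | some enc => solutionLoop2 enc (PySem.List.pyRange 1 ((A.length : Int) + 1) 1)

-- ===== PORT B =====
def solution_alt (A : List Int) : Int :=
  if PySem.List.sorted A (fun x => x) false = PySem.List.pyRange 1 ((A.length : Int) + 1) 1 then 1 else 0

-- ===== PRECONDITION & SPEC =====
def Spec_solution (A : List Int) (out : Int) : Prop := out = solution_alt A
instance (A : List Int) (out : Int) : Decidable (Spec_solution A out) := by unfold Spec_solution; infer_instance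

-- ===== CLAIM (what is proved, stated in full; the proofs are below) =====
def Claim_equal_solution : Prop := ∀ (A : List Int), Dom_solution A → Spec_solution A (solution A)

-- ===== LEMMAS AND PROOFS =====

-- loop1 succeeds iff the scanned elements are fresh (w.r.t. each other and enc) and ≤ N
theorem loop1_isSome (N : Int) (l : List Int) (enc : PySem.Set Int) :
    (solutionLoop1 N l enc).isSome = true ↔
      l.Nodup ∧ ∀ x ∈ l, x ∉ enc ∧ x ≤ N := by
  induction l generalizing enc with
  | nil => simp [solutionLoop1]
  | cons i rest ih =>
      by_cases h : (PySem.Set.contains enc i || decide (i > N)) = true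
      · rw [solutionLoop1, if_pos h]
        rw [Bool.or_eq_true, PySem.Set.contains_iff] at h
        constructor
        · intro hc; simp at hc
        · rintro ⟨-, hall⟩
          rcases hall i (by simp) with ⟨hne, hle⟩
          rcases h with h | h
          · exact absurd h hne
          · simp at h; omega
      · rw [solutionLoop1, if_neg h, ih]
        rw [Bool.or_eq_true, PySem.Set.contains_iff] at h
        rw [not_or] at h
        constructor
        · rintro ⟨hnd, hall⟩
          refine ⟨List.nodup_cons.mpr ⟨?_, hnd⟩, ?_⟩
          · intro hmem
            rcases hall i hmem with ⟨hni, -⟩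
            exact hni ((PySem.Set.mem_add enc i i).mpr (Or.inr rfl))
          · intro x hx
            rcases List.mem_cons.mp hx with hx | hx
            · subst hx
              exact ⟨h.1, by simpa using h.2⟩
            · rcases hall x hx with ⟨hne, hle⟩
              exact ⟨fun hc => hne ((PySem.Set.mem_add enc i x).mpr (Or.inl hc)), hle⟩
        · rintro ⟨hnd, hall⟩
          refine ⟨hnd.of_cons, ?_⟩
          intro x hx
          rcases hall x (by simp [hx]) with ⟨hne, hle⟩
          refine ⟨?_, hle⟩
          intro hc
          rcases (PySem.Set.mem_add enc i x).mp hc with hc | rfl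
          · exact hne hc
          · exact (List.nodup_cons.mp hnd).1 hx

-- on success, the resulting set's members are enc's plus the scanned ones
theorem loop1_mem (N : Int) (l : List Int) (enc enc' : PySem.Set Int)
    (h : solutionLoop1 N l enc = some enc') :
    ∀ x, x ∈ enc' ↔ x ∈ enc ∨ x ∈ l := by
  induction l generalizing enc with
  | nil =>
      rw [solutionLoop1, Option.some.injEq] at h
      subst h; simp
  | cons i rest ih =>
      by_cases hc : (PySem.Set.contains enc i || decide (i > N)) = true
      · rw [solutionLoop1, if_pos hc] at h
        exact absurd h (by simp)
      · rw [solutionLoop1, if_neg hc] at h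
        intro x
        rw [ih _ h x, PySem.Set.mem_add]
        constructor
        · rintro ((hx | rfl) | hx)
          · exact Or.inl hx
          · exact Or.inr (by simp)
          · exact Or.inr (by simp [hx])
        · rintro (hx | hx)
          · exact Or.inl (Or.inl hx)
          · rcases List.mem_cons.mp hx with rfl | hx
            · exact Or.inl (Or.inr rfl)
            · exact Or.inr hx

-- loop2 returns 1 exactly when every element of its range is in the set
theorem loop2_eq_one (enc : PySem.Set Int) (l : List Int) :
    solutionLoop2 enc l = if ∀ i ∈ l, i ∈ enc then 1 else 0 := by
  induction l with
  | nil => simp [solutionLoop2]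
  | cons i rest ih =>
      rw [solutionLoop2, ih]
      by_cases h : PySem.Set.contains enc i = true
      · have h' := (PySem.Set.contains_iff enc i).mp h
        simp [h']
      · have h' : i ∉ enc := fun hc => h ((PySem.Set.contains_iff enc i).mpr hc)
        simp [h']

-- A returns 1 exactly when A is a permutation of [1, …, N]
theorem solution_eq_one_iff (A : List Int) :
    solution A = 1 ↔ A.Perm (PySem.List.pyRange 1 ((A.length : Int) + 1) 1) := by
  set R := PySem.List.pyRange 1 ((A.length : Int) + 1) 1 with hR
  have hlenR : R.length = A.length := by
    rw [hR, PySem.List.length_pyRange_one]; omega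
  have hndR : R.Nodup := hR ▸ PySem.List.nodup_pyRange_one 1 _
  unfold solution
  cases hs : solutionLoop1 (A.length : Int) A PySem.Set.empty with
  | none =>
      simp only
      constructor
      · intro h; simp at h
      · intro hperm
        exfalso
        have hys : (solutionLoop1 (A.length : Int) A PySem.Set.empty).isSome = true := by
          rw [loop1_isSome]
          refine ⟨hperm.nodup_iff.mpr hndR, fun x hx => ?_⟩
          have hxR : x ∈ R := hperm.mem_iff.mp hx
          rw [hR, PySem.List.mem_pyRange_one] at hxR
          exact ⟨by simp [PySem.Set.empty], by omega⟩
        rw [hs] at hys; simp at hys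
  | some enc =>
      simp only [loop2_eq_one, ← hR]
      have hmem := loop1_mem _ _ _ _ hs
      have hsome : (solutionLoop1 (A.length : Int) A PySem.Set.empty).isSome = true := by
        rw [hs]; rfl
      rw [loop1_isSome] at hsome
      obtain ⟨hnd, -⟩ := hsome
      by_cases hin : ∀ i ∈ R, i ∈ enc
      · rw [if_pos hin]
        have hsub : ∀ i ∈ R, i ∈ A := by
          intro i hi
          rcases (hmem i).mp (hin i hi) with h | h
          · simp [PySem.Set.empty] at h
          · exact h
        have hsp : R.Subperm A := List.subperm_of_subset hndR hsub
        exact iff_of_true rfl (hsp.perm_of_length_le (by omega)).symm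
      · rw [if_neg hin]
        constructor
        · intro h; simp at h
        · intro hperm
          exact absurd (fun i hi => (hmem i).mpr (Or.inr (hperm.mem_iff.mpr hi))) hin

theorem solution_vals (A : List Int) : solution A = 0 ∨ solution A = 1 := by
  unfold solution
  cases hs : solutionLoop1 (A.length : Int) A PySem.Set.empty with
  | none => exact Or.inl rfl
  | some enc =>
      simp only [loop2_eq_one]
      split_ifs
      · exact Or.inr rfl
      · exact Or.inl rfl

-- B returns 1 exactly when A is a permutation of [1, …, N]
theorem alt_eq_one_iff (A : List Int) :
    solution_alt A = 1 ↔ A.Perm (PySem.List.pyRange 1 ((A.length : Int) + 1) 1) := by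
  unfold solution_alt
  split_ifs with h
  · have hperm := (PySem.List.sorted_perm A (fun x => x) false).symm
    rw [h] at hperm
    exact iff_of_true rfl hperm
  · refine iff_of_false (by simp) (fun hperm => h ?_)
    exact PySem.List.sorted_eq_of_perm_of_pairwise_lt A _ (fun x => x) hperm.symm
      (PySem.List.pairwise_lt_pyRange_one 1 _)

-- ===== VERDICT (by name: the statement is the Claim_ definition above) =====
theorem solution_spec : Claim_equal_solution := by
  intro A _
  unfold Spec_solution
  by_cases h : A.Perm (PySem.List.pyRange 1 ((A.length : Int) + 1) 1)
  · rw [(solution_eq_one_iff A).mpr h, (alt_eq_one_iff A).mpr h]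
  · have h1 : solution A ≠ 1 := fun hc => h ((solution_eq_one_iff A).mp hc)
    have h2 : solution_alt A ≠ 1 := fun hc => h ((alt_eq_one_iff A).mp hc)
    rcases solution_vals A with h0 | h0
    · rw [h0]
      unfold solution_alt at h2 ⊢
      split_ifs at h2 ⊢ with hs
      · exact absurd rfl h2
      · rfl
    · exact absurd h0 h1
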